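-- pv_equiv track=rewrite | github.com/RazerM/pg_grant | pg_grant/parse.py | _get_acl_username
-- ===== SOURCE A (Python) =====
-- def _get_acl_username(acl):
--     """Port of ``copyAclUserName`` from ``dumputils.c``"""
--     i = 0
--     output = ''
--
--     while i < len(acl) and acl[i] != '=':
--         # If user name isn't quoted, then just add it to the output buffer
--         if acl[i] != '"':
--             output += acl[i]
--             i += 1
--         else:
--             # Otherwise, it's a quoted username
--             i += 1
--
--             if i == len(acl):
--                 raise ValueError('ACL syntax error: unterminated quote.')
--
--             # Loop until we come across an unescaped quote
--             while not (acl[i] == '"' and acl[i + 1:i + 2] != '"'):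
--                 # Quoting convention is to escape " as "".
--                 if acl[i] == '"' and acl[i + 1:i + 2] == '"':
--                     i += 1
--
--                 output += acl[i]
--                 i += 1
--
--                 if i == len(acl):
--                     raise ValueError('ACL syntax error: unterminated quote.')
--
--             i += 1
--
--     return i, output
-- ===== SOURCE B (Python) =====
-- def _get_acl_username(acl):
--     """Single pass over the characters driven by an explicit in_quote state flag."""
--     i = 0
--     output = ''
--     in_quote = False
--     n = len(acl)
--     while i < n:
--         c = acl[i]
--         if not in_quote:
--             if c == '=':
--                 break
--             if c == '"':
--                 in_quote = True
--             else:
--                 output += c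
--             i += 1
--         else:
--             if c == '"':
--                 if i + 1 < n and acl[i + 1] == '"':
--                     output += '"'
--                     i += 2
--                 else:
--                     in_quote = False
--                     i += 1
--             else:
--                 output += c
--                 i += 1
--     if in_quote:
--         raise ValueError('ACL syntax error: unterminated quote.')
--     return i, output
-- ===== Notes on version B (the rewrite author's own statement) =====
-- stated objective: simpler
-- what changed: Replaces A's nested while-loops (a separate inner scanning loop for the quoted section, with two distinct raise points) by one single-pass loop driven by an explicit in_quote state flag, raising once after the loop if the string ended inside a quote.
import Mathlib
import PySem

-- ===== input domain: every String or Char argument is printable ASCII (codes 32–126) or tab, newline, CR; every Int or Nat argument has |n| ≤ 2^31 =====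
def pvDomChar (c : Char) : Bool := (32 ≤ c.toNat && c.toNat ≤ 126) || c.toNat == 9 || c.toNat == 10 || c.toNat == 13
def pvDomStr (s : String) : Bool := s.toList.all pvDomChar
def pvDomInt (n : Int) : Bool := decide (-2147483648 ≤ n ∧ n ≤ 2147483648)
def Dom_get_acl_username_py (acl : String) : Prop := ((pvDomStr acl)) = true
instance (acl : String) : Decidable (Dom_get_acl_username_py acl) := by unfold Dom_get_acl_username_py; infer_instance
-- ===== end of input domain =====

-- B replaces A's nested while-loops by one single-pass loop with an explicit in_quote flag (simpler decomposition, same cost).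
-- On inputs where the Python raises ValueError (unterminated quote) both helpers return none and the
-- wrapper defaults to (0, ""); those inputs are excluded by Pre_get_acl_username_py.

-- ===== PORT A =====
-- A's two nested loops, step for step, over the remaining characters (i tracks the Python index).
-- none = the Python raises ValueError.
mutual
  def pvAOuter : List Char → Int → String → Option (Int × String)
    | [], i, out => some (i, out)               -- while condition i < len fails
    | c :: rest, i, out =>
      if c = '=' then some (i, out)             -- while condition acl[i] != '=' fails
      else if c ≠ '"' then pvAOuter rest (i + 1) (out.push c)
      else                                      -- quoted username: i += 1
        if rest.isEmpty then none               -- if i == len(acl): raise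
        else pvAInner rest (i + 1) out
  termination_by cs _ _ => cs.length
  def pvAInner : List Char → Int → String → Option (Int × String)
    | [], _, _ => none                          -- (never reached: callers check emptiness first)
    | c :: rest, i, out =>
      if c = '"' ∧ rest.head? ≠ some '"' then   -- unescaped quote: inner loop exits, i += 1
        pvAOuter rest (i + 1) out
      else if c = '"' then                      -- escaped "": i += 1, then append acl[i], i += 1
        match rest with
        | [] => none                            -- (never reached: rest.head? = some '"')
        | d :: rest2 =>
          if rest2.isEmpty then none            -- if i == len(acl): raise
          else pvAInner rest2 (i + 2) (out.push d)
      else                                      -- ordinary char: append, i += 1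
        if rest.isEmpty then none               -- if i == len(acl): raise
        else pvAInner rest (i + 1) (out.push c)
  termination_by cs _ _ => cs.length
end


def get_acl_username_py (acl : String) : Int × String :=
  (pvAOuter acl.toList 0 "").getD (0, "")

-- ===== PORT B =====
-- B's single loop: q is the in_quote flag; none = raise after the loop (still in quote).
def pvBLoop : List Char → Int → String → Bool → Option (Int × String)
  | [], i, out, q => if q then none else some (i, out)
  | c :: rest, i, out, q =>
    if !q then
      if c = '=' then some (i, out)
      else if c = '"' then pvBLoop rest (i + 1) out true
      else pvBLoop rest (i + 1) (out.push c) false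
    else
      if c = '"' then
        if rest.head? = some '"' then pvBLoop rest.tail (i + 2) (out.push '"') true
        else pvBLoop rest (i + 1) out false
      else pvBLoop rest (i + 1) (out.push c) true
termination_by cs _ _ _ => cs.length
decreasing_by all_goals (simp [List.length_tail]; try omega)

def get_acl_username_py_alt (acl : String) : Int × String :=
  (pvBLoop acl.toList 0 "" false).getD (0, "")

-- ===== PRECONDITION & SPEC =====
-- Pre_ holds exactly where the Python A returns (no unterminated quote): either some '=' occurs at a
-- position preceded by an even number of '"' (scanning stops there), or the total number of '"' is even.
def Pre_get_acl_username_py (acl : String) : Prop :=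
  (∃ j < acl.toList.length, acl.toList[j]? = some '=' ∧ (acl.toList.take j).count '"' % 2 = 0)
  ∨ acl.toList.count '"' % 2 = 0
instance (acl : String) : Decidable (Pre_get_acl_username_py acl) := by
  unfold Pre_get_acl_username_py; infer_instance
def pvWitness_get_acl_username_py : String := "\"ro le\"=arwdDxt/admin"
def Spec_get_acl_username_py (acl : String) (out : Int × String) : Prop := out = get_acl_username_py_alt acl
instance (acl : String) (out : Int × String) : Decidable (Spec_get_acl_username_py acl out) := by unfold Spec_get_acl_username_py; infer_instance

-- ===== CLAIM (what is proved, stated in full; the proofs are below) =====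
def Claim_equal_get_acl_username_py : Prop := ∀ (acl : String), Dom_get_acl_username_py acl → Pre_get_acl_username_py acl → Spec_get_acl_username_py acl (get_acl_username_py acl)

-- ===== LEMMAS AND PROOFS =====

-- The two loop shapes compute the same option: A's outer loop is B's loop with q = false,
-- A's inner loop is B's loop with q = true.
theorem pvLoops_eq (n : Nat) : ∀ cs : List Char, cs.length ≤ n → ∀ (i : Int) (out : String),
    pvAOuter cs i out = pvBLoop cs i out false ∧ pvAInner cs i out = pvBLoop cs i out true := by
  induction n with
  | zero =>
    intro cs h i out
    have : cs = [] := List.eq_nil_of_length_eq_zero (Nat.le_zero.mp h)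
    subst this
    simp [pvAOuter, pvAInner, pvBLoop]
  | succ n ih =>
    intro cs h i out
    match cs with
    | [] => simp [pvAOuter, pvAInner, pvBLoop]
    | c :: rest =>
      have hrest : rest.length ≤ n := by simp at h; omega
      constructor
      · -- A's outer loop = B's loop with q = false
        rw [pvAOuter.eq_def]
        simp only [pvBLoop]
        by_cases he : c = '='
        · simp [he]
        · by_cases hq : c = '"'
          · subst hq
            simp [he]
            match rest with
            | [] => simp [pvBLoop]
            | d :: rest2 => simpa using (ih (d :: rest2) hrest (i + 1) out).2
          · simp [he, hq, (ih rest hrest (i + 1) (out.push c)).1]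
      · -- A's inner loop = B's loop with q = true
        rw [pvAInner.eq_def]
        simp only [pvBLoop]
        by_cases hq : c = '"'
        · subst hq
          by_cases hh : rest.head? = some '"'
          · match rest with
            | [] => simp at hh
            | d :: rest2 =>
              have hd : d = '"' := by simpa using hh
              subst hd
              have h2 : rest2.length ≤ n := by simp at hrest; omega
              simp
              match rest2 with
              | [] => simp [pvBLoop]
              | e :: rest3 => simpa using (ih (e :: rest3) h2 (i + 2) (out.push '"')).2
          · simp [hh, (ih rest hrest (i + 1) out).1]
        · simp [hq]
          match rest with
          | [] => simp [pvBLoop]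
          | d :: rest2 => simpa using (ih (d :: rest2) hrest (i + 1) (out.push c)).2

-- ===== VERDICT (by name: the statement is the Claim_ definition above) =====
theorem get_acl_username_py_spec : Claim_equal_get_acl_username_py := by
  intro acl _ _
  unfold Spec_get_acl_username_py get_acl_username_py get_acl_username_py_alt
  rw [(pvLoops_eq acl.toList.length acl.toList le_rfl 0 "").1]
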